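-- pv_equiv track=rewrite | github.com/MarcinGladkowski/advent_of_code_2023 | day_9/main.py | calculate_with_pre_extrapolation
-- ===== SOURCE A (Python) =====
-- def get_next_row(row: list) -> list:
--     """
--         Return next row with one element less len(row) - 6 return 5
--     """
--     new_row = []
--     for i, element in enumerate(row):
--         if i + 1 == len(row):
--             return new_row
--
--         new_row.append(row[i + 1] - row[i])
--
-- def are_only_zeros(row: list) -> bool:
--     return len(list(filter(lambda x: x == 0, row))) == len(row)
--
-- def generate_rows(row: list) -> list:
--     row_map = [row]
--     row_map = generate_row_recursion(row_map, row)
--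
--     return row_map
--
-- def generate_row_recursion(row_map: list, row: list) -> list:
--     next_row = get_next_row(row)
--     row_map.append(next_row)
--     if are_only_zeros(next_row):
--         return row_map
--
--     return generate_row_recursion(row_map, next_row)
--
-- def extrapolate_map_from_begging(generated_map: list) -> list:
--     for i in reversed(range(0, len(generated_map))):
--         if i == 0:
--             return generated_map
--
--         if i == len(generated_map) - 1:
--             """Set zero in front of last row"""
--             generated_map[len(generated_map) - 1].insert(0, 0)
--
--         up = generated_map[i - 1]
--         bottom = generated_map[i]
--
--         up, bottom = extrapolate_first_element(up, bottom)
--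
--         generated_map[i - 1] = up
--         generated_map[i] = bottom
--
--     return generated_map
--
-- def get_extrapolate_for_first_value(bottom: list, up: list):
--     return up[0] - bottom[0]
--
-- def add_extrapolate_on_first_index(value: int, up: list):
--     up.insert(0, value)
--     return up
--
-- def extrapolate_first_element(up: list, bottom: list) -> tuple:
--     value = get_extrapolate_for_first_value(bottom, up)
--     add_extrapolate_on_first_index(value, up)
--     return up, bottom
--
-- def calculate_with_pre_extrapolation(data: list) -> int:
--     result = 0
--     for i, row in enumerate(data):
--         row_map = generate_rows(row)
--         extrapolated_map = extrapolate_map_from_begging(row_map)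
--         last_extrapolated_number = extrapolated_map[0][0]
--         result += last_extrapolated_number  # last element top row
--
--     return result
-- ===== SOURCE B (Python) =====
-- def calculate_with_pre_extrapolation(data: list) -> int:
--     # Backward finite-difference extrapolation of each row, summed.
--     # Closed form: the value extrapolated in front of a row of length n is
--     # sum_{j=0}^{n-1} (-1)^j * C(n, j+1) * row[j]; the binomial coefficients
--     # are produced incrementally in O(n) per row.
--     result = 0
--     for row in data:
--         n = len(row)
--         c = n          # C(n, 1)
--         sign = 1
--         j = 0
--         for x in row:
--             result += sign * c * x
--             c = c * (n - j - 1) // (j + 2)   # C(n, j+2), exact division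
--             sign = -sign
--             j += 1
--     return result
-- ===== Notes on version B (the rewrite author's own statement) =====
-- stated objective: faster
-- what changed: B replaces A's construction of the whole difference triangle plus a mutating front-extrapolation pass by the closed form: each row of length n contributes sum_j (-1)^j*C(n,j+1)*row[j], with the binomial coefficients generated incrementally, one multiplication and one exact division per element.
import Mathlib
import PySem

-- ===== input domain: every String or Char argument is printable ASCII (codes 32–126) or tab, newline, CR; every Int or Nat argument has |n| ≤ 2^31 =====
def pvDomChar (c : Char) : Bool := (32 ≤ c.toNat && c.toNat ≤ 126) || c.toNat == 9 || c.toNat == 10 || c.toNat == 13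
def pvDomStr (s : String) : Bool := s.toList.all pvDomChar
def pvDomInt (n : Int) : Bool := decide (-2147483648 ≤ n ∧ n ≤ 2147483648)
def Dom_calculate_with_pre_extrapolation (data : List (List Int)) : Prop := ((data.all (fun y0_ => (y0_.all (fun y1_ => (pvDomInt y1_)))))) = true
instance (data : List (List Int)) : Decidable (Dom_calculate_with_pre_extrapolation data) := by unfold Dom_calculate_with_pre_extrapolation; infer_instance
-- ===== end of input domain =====

-- B replaces A's difference-triangle construction + mutating front-extrapolation by the
-- closed-form alternating binomial sum per row (O(m*n) instead of O(m*n^2)).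
-- NOTE: Python A mutates its argument's rows in place (inserts values at their front); the
-- equivalence proved here is about the RETURN value only (B does not mutate).

-- ===== PORT A =====
-- adjacent-difference list: value of A's get_next_row on a nonempty row (proof-side
-- characterisation, needed above the port for its termination argument)
def pvDiff : List Int → List Int
  | x :: y :: t => (y - x) :: pvDiff (y :: t)
  | _ => []

theorem pvDiff_length (x : Int) (t : List Int) : (pvDiff (x :: t)).length = t.length := by
  induction t generalizing x with
  | nil => simp [pvDiff]
  | cons y t ih => simp [pvDiff, ih y]

-- loop of get_next_row: iterates over enumerate(row); returns new_row just before the last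
-- index; falls off the end only for an empty row (Python then returns None)
def gnr_loop (row : List Int) : List (Int × Int) → List Int → Option (List Int)
  | [], _ => none
  | (i, _) :: rest, new_row =>
    if i + 1 = (row.length : Int) then some new_row
    else gnr_loop row rest (new_row ++ [PySem.List.pyGetD row (i + 1) 0 - PySem.List.pyGetD row i 0])

def get_next_row (row : List Int) : Option (List Int) :=
  gnr_loop row (PySem.List.enumerate row) []

theorem gnr_inv (row : List Int) :
    ∀ (suf : List Int) (j : Nat) (acc : List Int), j + suf.length = row.length →
      suf = row.drop j → suf ≠ [] →
      gnr_loop row (PySem.List.enumerate suf (j : Int)) acc = some (acc ++ pvDiff suf) := by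
  intro suf
  induction suf with
  | nil => intro j acc _ _ h; exact absurd rfl h
  | cons a t ih =>
    intro j acc hlen hdrop _
    rw [PySem.List.enumerate_cons]
    by_cases hone : (j : Int) + 1 = (row.length : Int)
    · have ht : t = [] := by
        have h1 : j + 1 = row.length := by exact_mod_cast hone
        have h2 : t.length = 0 := by simp at hlen; omega
        exact List.eq_nil_of_length_eq_zero h2
      subst ht
      simp [gnr_loop, hone, pvDiff]
    · have hlt : j + 1 < row.length := by
        have : j + 1 ≠ row.length := fun h => hone (by exact_mod_cast h)
        simp at hlen; omega
      -- t is nonempty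
      cases t with
      | nil => simp at hlen; omega
      | cons b t' =>
        have hja : row.drop j = a :: b :: t' := hdrop.symm
        have hjb : row.drop (j + 1) = b :: t' := by
          have := congrArg List.tail hja
          simpa [List.tail_drop] using this
        have hga : row.getD j 0 = a := by
          have h1 : row[j]? = some a := by
            have h2 : (List.drop j row)[0]? = row[j + 0]? := List.getElem?_drop
            simp only [hja, Nat.add_zero] at h2
            simpa using h2.symm
          simp [List.getD_eq_getElem?_getD, h1]
        have hgb : row.getD (j + 1) 0 = b := by
          have h1 : row[j + 1]? = some b := by
            have h2 : (List.drop (j + 1) row)[0]? = row[(j + 1) + 0]? := List.getElem?_drop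
            simp only [hjb, Nat.add_zero] at h2
            simpa using h2.symm
          simp [List.getD_eq_getElem?_getD, h1]
        have hrec := ih (j + 1) (acc ++ [b - a]) (by simp at hlen ⊢; omega) hjb.symm (by simp)
        rw [gnr_loop, if_neg hone]
        have hcast : (j : Int) + 1 = ((j + 1 : Nat) : Int) := by push_cast; ring
        rw [hcast, PySem.List.pyGetD_natCast, PySem.List.pyGetD_natCast, hga, hgb, hrec]
        simp [pvDiff]

theorem get_next_row_eq (row : List Int) (h : row ≠ []) :
    get_next_row row = some (pvDiff row) := by
  have := gnr_inv row row 0 [] (by simp) (by simp) h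
  simpa [get_next_row] using this

theorem get_next_row_some_length {row r : List Int} (h : get_next_row row = some r) :
    r.length < row.length := by
  cases row with
  | nil => simp [get_next_row, PySem.List.enumerate_nil, gnr_loop] at h
  | cons x t =>
    rw [get_next_row_eq _ (by simp)] at h
    cases h
    simp [pvDiff_length]

def are_only_zeros (row : List Int) : Bool :=
  (row.filter (fun x => x == 0)).length == row.length

def generate_row_recursion (row_map : List (List Int)) (row : List Int) : List (List Int) :=
  match h : get_next_row row with
  | none => row_map          -- Python raises TypeError here; unreachable under Pre_
  | some next_row =>
    if are_only_zeros next_row then row_map ++ [next_row]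
    else generate_row_recursion (row_map ++ [next_row]) next_row
termination_by row.length
decreasing_by exact get_next_row_some_length h

def generate_rows (row : List Int) : List (List Int) :=
  generate_row_recursion [row] row

-- loop of extrapolate_map_from_begging, i counting down; all list indices reached on inputs
-- satisfying Pre_ are in range, so getD is Python's indexing there
def emfb_loop : List (List Int) → Nat → List (List Int)
  | g, 0 => g
  | g, (i + 1) =>
    let g1 := if i + 1 = g.length - 1 then g.set (g.length - 1) (0 :: g.getD (g.length - 1) []) else g
    let up := g1.getD i []
    let bottom := g1.getD (i + 1) []
    let value := up.getD 0 0 - bottom.getD 0 0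
    emfb_loop (g1.set i (value :: up)) i

def extrapolate_map_from_begging (g : List (List Int)) : List (List Int) :=
  emfb_loop g (g.length - 1)

def calculate_with_pre_extrapolation (data : List (List Int)) : Int :=
  data.foldl (fun result row =>
    result + ((extrapolate_map_from_begging (generate_rows row)).getD 0 []).getD 0 0) 0

-- ===== PORT B =====
-- per-row loop of Source B: result accumulates sign * C(n, j+1) * row[j]; c is updated by one
-- multiplication and one exact floor division per element
def brow_loop (n : Int) : List Int → Int → Int → Int → Int → Int
  | [], result, _, _, _ => result
  | x :: t, result, c, sign, j =>
    brow_loop n t (result + sign * c * x) (PySem.Int.floordiv (c * (n - j - 1)) (j + 2)) (-sign) (j + 1)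

def calculate_with_pre_extrapolation_alt (data : List (List Int)) : Int :=
  data.foldl (fun result row =>
    brow_loop (row.length : Int) row result (row.length : Int) 1 0) 0

-- ===== PRECONDITION & SPEC =====
-- Pre_ excludes exactly the inputs containing an empty row: there Python A raises TypeError
-- (get_next_row returns None, which are_only_zeros then tries to iterate).
def Pre_calculate_with_pre_extrapolation (data : List (List Int)) : Prop :=
  ∀ row ∈ data, row ≠ []
instance (data : List (List Int)) : Decidable (Pre_calculate_with_pre_extrapolation data) := by
  unfold Pre_calculate_with_pre_extrapolation; infer_instance

def pvWitness_calculate_with_pre_extrapolation : List (List Int) :=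
  [[0, 3, 6, 9, 12, 15], [1, 3, 6, 10, 15, 21], [10, 13, 16, 21, 30, 45]]

def Spec_calculate_with_pre_extrapolation (data : List (List Int)) (out : Int) : Prop :=
  out = calculate_with_pre_extrapolation_alt data
instance (data : List (List Int)) (out : Int) : Decidable (Spec_calculate_with_pre_extrapolation data out) := by
  unfold Spec_calculate_with_pre_extrapolation; infer_instance

-- ===== CLAIM (what is proved, stated in full; the proofs are below) =====
def Claim_equal_calculate_with_pre_extrapolation : Prop :=
  ∀ (data : List (List Int)), Dom_calculate_with_pre_extrapolation data →
    Pre_calculate_with_pre_extrapolation data →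
    Spec_calculate_with_pre_extrapolation data (calculate_with_pre_extrapolation data)

-- ===== LEMMAS AND PROOFS =====

-- head with default 0 (value Python reads as r[0]; 0 exactly on the rows where A reads an
-- inserted 0 or a row of zeros)
def pvHd (r : List Int) : Int := r.getD 0 0

-- alternating sum of the heads of a list of rows
def pvAsum : List (List Int) → Int
  | [] => 0
  | r :: rs => pvHd r - pvAsum rs

-- the common specification: backward finite-difference extrapolation
def pvG : List Int → Int
  | [] => 0
  | x :: t => x - pvG (pvDiff (x :: t))
termination_by l => l.length
decreasing_by simp [pvDiff_length]

-- chain of difference rows appended by generate_row_recursion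
def pvChain (row : List Int) : List (List Int) :=
  match h : get_next_row row with
  | none => []
  | some next_row =>
    if are_only_zeros next_row then [next_row] else next_row :: pvChain next_row
termination_by row.length
decreasing_by exact get_next_row_some_length h

theorem pvAsum_append_singleton (l : List (List Int)) (r : List Int) :
    pvAsum (l ++ [r]) = pvAsum l + (-1 : Int) ^ l.length * pvHd r := by
  induction l with
  | nil => simp [pvAsum]
  | cons a t ih => simp [pvAsum, ih, pow_succ]; ring



-- ---- general list facts used by the extrapolation-loop invariant ----
theorem pv_getD_set_self (g : List (List Int)) (i : Nat) (v : List Int) (h : i < g.length) :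
    (g.set i v).getD i [] = v := by
  simp [List.getD_eq_getElem?_getD, List.getElem?_set_self, h]

theorem pv_getD_set_ne (g : List (List Int)) (i j : Nat) (v : List Int) (h : i ≠ j) :
    (g.set i v).getD j [] = g.getD j [] := by
  simp [List.getD_eq_getElem?_getD, List.getElem?_set_ne h]

theorem pv_take_set_succ (g : List (List Int)) (i : Nat) (v : List Int) (h : i < g.length) :
    (g.set i v).take (i + 1) = g.take i ++ [v] := by
  rw [List.set_eq_take_cons_drop v h, List.take_append]
  simp [List.take_take, List.length_take, Nat.min_eq_left h.le]

theorem pv_take_set_of_le (g : List (List Int)) (i j : Nat) (v : List Int) (h : i ≤ j) :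
    (g.set j v).take i = g.take i := by
  by_cases hj : j < g.length
  · rw [List.set_eq_take_cons_drop v hj, List.take_append]
    have h0 : i - (List.take j g).length = 0 := by simp [List.length_take]; omega
    rw [h0]
    simp [List.take_take, Nat.min_eq_left h]
  · rw [List.set_eq_of_length_le (by omega)]

-- ---- zeros ----
theorem are_only_zeros_iff (r : List Int) : are_only_zeros r = true ↔ ∀ x ∈ r, x = 0 := by
  simp [are_only_zeros, List.length_filter_eq_length_iff]

theorem pvHd_zeros {r : List Int} (h : ∀ x ∈ r, x = 0) : pvHd r = 0 := by
  cases r with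
  | nil => rfl
  | cons a t => simpa [pvHd] using h a (by simp)

theorem pvDiff_zeros {l : List Int} (h : ∀ x ∈ l, x = 0) : ∀ x ∈ pvDiff l, x = 0 := by
  induction l with
  | nil => simp [pvDiff]
  | cons a t ih =>
    cases t with
    | nil => simp [pvDiff]
    | cons b t' =>
      intro x hx
      rw [pvDiff] at hx
      rcases List.mem_cons.mp hx with h1 | h1
      · have ha := h a (by simp); have hb := h b (by simp)
        omega
      · exact ih (fun y hy => h y (List.mem_cons_of_mem a hy)) x h1

theorem pvG_zeros : ∀ (r : List Int), (∀ x ∈ r, x = 0) → pvG r = 0 := by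
  intro r
  induction hn : r.length using Nat.strong_induction_on generalizing r with
  | _ n ih =>
    cases r with
    | nil => intro _; simp [pvG]
    | cons x t =>
      intro hz
      rw [pvG]
      have hx := hz x (by simp)
      have hlen : (pvDiff (x :: t)).length = t.length := pvDiff_length x t
      have := ih (pvDiff (x :: t)).length (by simp [hlen, ← hn]) (pvDiff (x :: t))
        rfl (pvDiff_zeros hz)
      omega

-- ---- A's generate phase produces row :: pvChain row ----
theorem grr_eq : ∀ (m : List (List Int)) (row : List Int),
    generate_row_recursion m row = m ++ pvChain row := by
  intro m row
  fun_induction generate_row_recursion m row with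
  | case1 m row h => rw [pvChain, h]; simp
  | case2 m row nr h hz => rw [pvChain, h]; simp [hz]
  | case3 m row nr h hz ih => rw [pvChain, h]; simp [hz]; rw [ih]; simp

theorem pvChain_cons (row : List Int) (h : row ≠ []) :
    pvChain row = pvDiff row ::
      (if are_only_zeros (pvDiff row) then [] else pvChain (pvDiff row)) := by
  rw [pvChain, get_next_row_eq row h]
  by_cases hz : are_only_zeros (pvDiff row) <;> simp [hz]

theorem pvChain_last_zeros : ∀ (row : List Int), row ≠ [] →
    ∃ init z, pvChain row = init ++ [z] ∧ (∀ x ∈ z, x = 0) := by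
  intro row
  induction hn : row.length using Nat.strong_induction_on generalizing row with
  | _ n ih =>
    intro h
    rw [pvChain_cons row h]
    by_cases hz : are_only_zeros (pvDiff row)
    · exact ⟨[], pvDiff row, by simp [hz], (are_only_zeros_iff _).mp hz⟩
    · have hd : pvDiff row ≠ [] := by
        intro he; rw [he] at hz; exact hz rfl
      obtain ⟨x, t, rfl⟩ : ∃ x t, row = x :: t := by
        cases row with
        | nil => exact absurd rfl h
        | cons x t => exact ⟨x, t, rfl⟩
      have hlen : (pvDiff (x :: t)).length < n := by
        rw [pvDiff_length]; simp at hn; omega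
      obtain ⟨init, z, hc, hzz⟩ := ih _ hlen _ rfl hd
      exact ⟨pvDiff (x :: t) :: init, z, by simp [hz, hc], hzz⟩

-- ---- the common spec equals the alternating head sum of the generated rows ----
theorem pvG_asum : ∀ (row : List Int), row ≠ [] →
    pvG row = pvAsum (row :: pvChain row) := by
  intro row
  induction hn : row.length using Nat.strong_induction_on generalizing row with
  | _ n ih =>
    intro h
    obtain ⟨x, t, rfl⟩ : ∃ x t, row = x :: t := by
      cases row with
      | nil => exact absurd rfl h
      | cons x t => exact ⟨x, t, rfl⟩
    rw [pvChain_cons _ h, pvG]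
    by_cases hz : are_only_zeros (pvDiff (x :: t))
    · have h0 : pvG (pvDiff (x :: t)) = 0 := pvG_zeros _ ((are_only_zeros_iff _).mp hz)
      have h1 : pvHd (pvDiff (x :: t)) = 0 := pvHd_zeros ((are_only_zeros_iff _).mp hz)
      have hx : pvHd (x :: t) = x := rfl
      simp only [hz, if_true, pvAsum, h0, h1, hx]
      ring
    · have hd : pvDiff (x :: t) ≠ [] := by
        intro he; rw [he] at hz; exact hz rfl
      have hlen : (pvDiff (x :: t)).length < n := by
        rw [pvDiff_length]; simp at hn; omega
      have hrec := ih _ hlen _ rfl hd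
      have hx : pvHd (x :: t) = x := rfl
      simp only [hz, pvAsum, hx, Bool.false_eq_true, if_false]
      rw [hrec]
      simp only [pvAsum]

-- ---- extrapolation loop invariant ----
theorem pv_take_succ (g : List (List Int)) (n : Nat) (h : n < g.length) :
    g.take (n + 1) = g.take n ++ [g[n]] := by
  rw [List.take_add_one]
  simp [List.getElem?_eq_getElem h]

theorem pv_getD_eq (g : List (List Int)) (k : Nat) (h : k < g.length) :
    g.getD k [] = g[k] := List.getD_eq_getElem g [] h

theorem emfb_steady : ∀ (i : Nat) (g : List (List Int)), 1 ≤ i → i + 2 ≤ g.length →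
    (emfb_loop g i).getD 0 [] = pvAsum (g.take (i + 1)) :: g.getD 0 [] := by
  intro i
  induction i with
  | zero => intro g h; omega
  | succ i ih =>
    intro g _ hlen
    rw [emfb_loop]
    have hne : ¬ (i + 1 = g.length - 1) := by omega
    simp only [hne, if_false]
    have hup : g.getD i [] = g[i]'(by omega) := pv_getD_eq g i (by omega)
    have hbot : g.getD (i + 1) [] = g[i + 1]'(by omega) := pv_getD_eq g (i + 1) (by omega)
    rcases Nat.eq_zero_or_pos i with h0 | hpos
    · subst h0
      rw [emfb_loop]
      rw [pv_getD_set_self g 0 _ (by omega)]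
      have ht2 : g.take 2 = [g[0]'(by omega), g[1]'(by omega)] := by
        rw [pv_take_succ g 1 (by omega), pv_take_succ g 0 (by omega)]
        simp
      rw [ht2]
      simp only [pvAsum, pvHd, hup, hbot]
      norm_num
    · rw [ih (g.set i (((g.getD i []).getD 0 0 - (g.getD (i + 1) []).getD 0 0) :: g.getD i []))
        hpos (by simp; omega)]
      rw [pv_getD_set_ne g i 0 _ (by omega)]
      rw [pv_take_set_succ g i _ (by omega)]
      rw [pvAsum_append_singleton]
      rw [pv_take_succ g (i + 1) (by omega), pv_take_succ g i (by omega)]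
      congr 1
      rw [pvAsum_append_singleton, pvAsum_append_singleton]
      simp only [pvHd, hup, hbot, List.getD_cons_zero, List.length_append, List.length_take,
        List.length_cons, List.length_nil, Nat.min_eq_left (show i ≤ g.length by omega)]
      rw [pow_succ]
      ring

theorem emfb_top (m : List (List Int)) (h2 : 2 ≤ m.length) :
    ((emfb_loop m (m.length - 1)).getD 0 []).getD 0 0 = pvAsum (m.take (m.length - 1)) := by
  obtain ⟨k, hk⟩ : ∃ k, m.length = k + 2 := ⟨m.length - 2, by omega⟩
  have hk1 : m.length - 1 = k + 1 := by omega
  rw [hk1, emfb_loop]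
  have hcond : k + 1 = m.length - 1 := hk1.symm
  rw [if_pos hcond, hk1]
  have hset : k + 1 < m.length := by omega
  have hbot : (m.set (k + 1) (0 :: m.getD (k + 1) [])).getD (k + 1) []
      = 0 :: m.getD (k + 1) [] := pv_getD_set_self m (k + 1) _ hset
  have hup : (m.set (k + 1) (0 :: m.getD (k + 1) [])).getD k [] = m.getD k [] :=
    pv_getD_set_ne m (k + 1) k _ (by omega)
  rw [hbot, hup]
  rcases Nat.eq_zero_or_pos k with h0 | hpos
  · subst h0
    rw [emfb_loop]
    rw [pv_getD_set_self _ 0 _ (by simp; omega)]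
    have ht1 : m.take 1 = [m[0]'(by omega)] := by
      rw [pv_take_succ m 0 (by omega)]; simp
    rw [ht1]
    simp only [pvAsum, pvHd, pv_getD_eq m 0 (by omega)]
    norm_num
  · rw [emfb_steady k _ hpos (by simp; omega)]
    simp only [List.getD_cons_zero]
    rw [pv_take_set_succ _ k _ (by simp; omega)]
    rw [pv_take_set_of_le m k (k + 1) _ (Nat.le_succ k)]
    rw [pvAsum_append_singleton]
    rw [pv_take_succ m k (by omega)]
    rw [pvAsum_append_singleton]
    simp only [List.length_take, Nat.min_eq_left (by omega : k ≤ m.length)]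
    simp only [pvHd, List.getD_cons_zero, pv_getD_eq m k (by omega)]
    norm_num

-- A's per-row value equals the common spec
theorem rowA_eq_pvG (row : List Int) (h : row ≠ []) :
    ((extrapolate_map_from_begging (generate_rows row)).getD 0 []).getD 0 0 = pvG row := by
  unfold extrapolate_map_from_begging generate_rows
  rw [grr_eq [row] row]
  obtain ⟨init, z, hc, hzz⟩ := pvChain_last_zeros row h
  have hm : [row] ++ pvChain row = (row :: init) ++ [z] := by simp [hc]
  rw [hm]
  have h2 : 2 ≤ ((row :: init) ++ [z]).length := by simp
  rw [emfb_top _ h2]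
  have hlen1 : ((row :: init) ++ [z]).length - 1 = (row :: init).length := by simp
  rw [hlen1, List.take_left]
  have hfull : pvG row = pvAsum ((row :: init) ++ [z]) := by
    rw [← hm]; simpa using pvG_asum row h
  rw [hfull, pvAsum_append_singleton, pvHd_zeros hzz]
  ring

-- ---- B side: the coefficient loop computes the binomial-weighted sum ----
def pvWsum (n : Nat) : Nat → List Int → Int
  | _, [] => 0
  | j, x :: t => (-1 : Int) ^ j * (n.choose (j + 1) : Int) * x + pvWsum n (j + 1) t

theorem brow_inv (n : Nat) : ∀ (t : List Int) (j : Nat) (result : Int),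
    j + t.length = n →
    brow_loop (n : Int) t result ((n.choose (j + 1) : Int)) ((-1 : Int) ^ j) (j : Int) =
      result + pvWsum n j t := by
  intro t
  induction t with
  | nil => intro j result _; simp [brow_loop, pvWsum]
  | cons x t' ih =>
    intro j result hlen
    have hj1 : j + 1 ≤ n := by simp at hlen; omega
    rw [brow_loop]
    have hc : PySem.Int.floordiv ((n.choose (j + 1) : Int) * ((n : Int) - (j : Int) - 1)) ((j : Int) + 2)
        = (n.choose (j + 2) : Int) := by
      have h1 : ((n : Int) - (j : Int) - 1) = ((n - (j + 1) : Nat) : Int) := by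
        rw [Nat.cast_sub hj1]; push_cast; ring
      have h2 : ((j : Int) + 2) = ((j + 2 : Nat) : Int) := by push_cast; ring
      rw [h1, h2, ← Nat.cast_mul, PySem.Int.floordiv_natCast]
      have h3 : n.choose (j + 1) * (n - (j + 1)) = n.choose (j + 2) * (j + 2) := by
        exact (Nat.choose_succ_right_eq n (j + 1)).symm
      rw [h3, Nat.mul_div_cancel _ (by omega)]
    have hsg : -(-1 : Int) ^ j = (-1 : Int) ^ (j + 1) := by rw [pow_succ]; ring
    have hjc : (j : Int) + 1 = ((j + 1 : Nat) : Int) := by push_cast; ring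
    rw [hc, hsg, hjc]
    rw [ih (j + 1) (result + (-1) ^ j * (n.choose (j + 1) : Int) * x) (by simp at hlen ⊢; omega)]
    rw [pvWsum]
    ring

-- ---- the alternating binomial identity behind the difference triangle ----
theorem pvK : ∀ (t : List Int) (x : Int) (j n : Nat), j + 1 + t.length = n →
    pvWsum (n - 1) j (pvDiff (x :: t)) + pvWsum n (j + 1) t =
      (-1 : Int) ^ (j + 1) * ((n - 1).choose (j + 1) : Int) * x := by
  intro t
  induction t with
  | nil =>
    intro x j n hlen
    simp only [List.length_nil, Nat.add_zero] at hlen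
    have h0 : (n - 1).choose (j + 1) = 0 := Nat.choose_eq_zero_of_lt (by omega)
    simp [pvDiff, pvWsum, h0]
  | cons y t' ih =>
    intro x j n hlen
    obtain ⟨m, rfl⟩ : ∃ m, n = m + 1 := ⟨n - 1, by simp at hlen; omega⟩
    have hihy := ih y (j + 1) (m + 1) (by simp at hlen ⊢; omega)
    have hm : m + 1 - 1 = m := rfl
    rw [hm] at hihy ⊢
    have hIH : pvWsum m (j + 1) (pvDiff (y :: t'))
        = (-1 : Int) ^ (j + 2) * (m.choose (j + 2) : Int) * y - pvWsum (m + 1) (j + 2) t' := by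
      linarith [hihy]
    rw [pvDiff, pvWsum, pvWsum, hIH]
    have hpascal : (m + 1).choose (j + 2) = m.choose (j + 1) + m.choose (j + 2) :=
      Nat.choose_succ_succ m (j + 1)
    rw [hpascal]
    have hs1 : (-1 : Int) ^ (j + 1) = -(-1 : Int) ^ j := by rw [pow_succ]; ring
    have hs2 : (-1 : Int) ^ (j + 2) = (-1 : Int) ^ j := by rw [pow_succ, pow_succ]; ring
    rw [hs1, hs2]
    push_cast
    ring

theorem pvG_wsum : ∀ (row : List Int), pvG row = pvWsum row.length 0 row := by
  intro row
  induction hn : row.length using Nat.strong_induction_on generalizing row with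
  | _ n ih =>
    subst hn
    cases row with
    | nil => simp [pvG, pvWsum]
    | cons x t =>
      rw [pvG]
      have hlen : (pvDiff (x :: t)).length = t.length := pvDiff_length x t
      have hrec := ih (pvDiff (x :: t)).length (by simp [hlen]) (pvDiff (x :: t)) rfl
      rw [hrec, hlen]
      have hK := pvK t x 0 (t.length + 1) (by omega)
      have hm : t.length + 1 - 1 = t.length := rfl
      rw [hm] at hK
      norm_num at hK
      have h1 : pvWsum t.length 0 (pvDiff (x :: t))
          = -((t.length : Int) * x) - pvWsum (t.length + 1) 1 t := by
        linarith [hK]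
      rw [h1, pvWsum]
      simp [Nat.choose_one_right]
      push_cast
      ring

-- B's per-row value equals the common spec
theorem rowB_eq_pvG (row : List Int) (result : Int) :
    brow_loop (row.length : Int) row result (row.length : Int) 1 0 = result + pvG row := by
  have h1 := brow_inv row.length row 0 result (by simp)
  norm_num [Nat.choose_one_right] at h1
  rw [h1, pvG_wsum]

-- ---- assembling the folds ----
theorem foldA (data : List (List Int)) (h : ∀ row ∈ data, row ≠ []) : ∀ (init : Int),
    data.foldl (fun result row =>
      result + ((extrapolate_map_from_begging (generate_rows row)).getD 0 []).getD 0 0) init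
      = init + (data.map pvG).sum := by
  induction data with
  | nil => intro init; simp
  | cons r d ih =>
    intro init
    simp only [List.foldl_cons, List.map_cons, List.sum_cons]
    rw [ih (fun row hr => h row (List.mem_cons_of_mem r hr)) _]
    rw [rowA_eq_pvG r (h r (by simp))]
    ring

theorem foldB (data : List (List Int)) : ∀ (init : Int),
    data.foldl (fun result row =>
      brow_loop (row.length : Int) row result (row.length : Int) 1 0) init
      = init + (data.map pvG).sum := by
  induction data with
  | nil => intro init; simp
  | cons r d ih =>
    intro init
    simp only [List.foldl_cons, List.map_cons, List.sum_cons]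
    rw [rowB_eq_pvG r init, ih _]
    ring

-- ===== VERDICT (by name: the statement is the Claim_ definition above) =====
theorem calculate_with_pre_extrapolation_spec : Claim_equal_calculate_with_pre_extrapolation := by
  intro data _ hpre
  unfold Spec_calculate_with_pre_extrapolation calculate_with_pre_extrapolation calculate_with_pre_extrapolation_alt
  rw [foldA data hpre 0, foldB data 0]
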